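-- pv_equiv track=rewrite | github.com/obinexus/obinexus_autonomy_case | scripts/tags_extractor/tag_extractor.py | _get_tag_category
-- ===== SOURCE A (Python) =====
-- def _get_tag_category(tag: str) -> str:
--     """Determine category for a tag"""
--     category_mapping = {
--         'housing': ['housing_denial', 'section_202', 'homelessness'],
--         'mental_health': ['mental_health', 'ellingham', 'child_protection'],
--         'legal': ['sar_denial', 'discrimination', 'compensation'],
--         'system_failure': ['entrapment', 'negligence'],
--         'evidence': ['critical_evidence']
--     }
--
--     for category, tags in category_mapping.items():
--         if tag in tags:
--             return category
--     return 'other'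
-- ===== SOURCE B (Python) =====
-- # Binary search over a sorted (tag, category) table instead of scanning category lists.
-- _SORTED_TAGS = (
--     ('child_protection', 'mental_health'),
--     ('compensation', 'legal'),
--     ('critical_evidence', 'evidence'),
--     ('discrimination', 'legal'),
--     ('ellingham', 'mental_health'),
--     ('entrapment', 'system_failure'),
--     ('homelessness', 'housing'),
--     ('housing_denial', 'housing'),
--     ('mental_health', 'mental_health'),
--     ('negligence', 'system_failure'),
--     ('sar_denial', 'legal'),
--     ('section_202', 'housing'),
-- )
--
-- def _get_tag_category(tag: str) -> str:
--     """Determine category for a tag"""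
--     lo, hi = 0, len(_SORTED_TAGS)
--     while lo < hi:
--         mid = (lo + hi) // 2
--         key, cat = _SORTED_TAGS[mid]
--         if key == tag:
--             return cat
--         if key < tag:
--             lo = mid + 1
--         else:
--             hi = mid
--     return 'other'
-- ===== Notes on version B (the rewrite author's own statement) =====
-- stated objective: alternative
-- what changed: Replaced A's linear scan over a category->tag-list dict (membership test per category) by binary search over a sorted flat (tag, category) table, falling back to the default category when the search window empties.
import Mathlib
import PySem

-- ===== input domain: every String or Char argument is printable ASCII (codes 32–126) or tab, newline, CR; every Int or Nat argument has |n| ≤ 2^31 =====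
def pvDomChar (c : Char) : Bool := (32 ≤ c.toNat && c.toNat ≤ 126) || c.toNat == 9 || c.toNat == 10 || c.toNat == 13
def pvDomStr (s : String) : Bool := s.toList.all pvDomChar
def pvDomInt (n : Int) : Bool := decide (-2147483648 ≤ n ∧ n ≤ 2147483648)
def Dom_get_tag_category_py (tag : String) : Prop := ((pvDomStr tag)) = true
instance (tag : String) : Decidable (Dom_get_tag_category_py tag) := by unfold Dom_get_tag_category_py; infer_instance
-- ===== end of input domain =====

-- B replaces A's linear scan over category tag-lists by binary search in a sorted
-- flat (tag, category) table, falling back to the default category when the window empties (alternative algorithm).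

-- ===== PORT A =====
-- the dict literal of A, in insertion order
def pvCategoryMapping : PySem.Dict String (List String) := PySem.Dict.mk
  [("housing", ["housing_denial", "section_202", "homelessness"]),
   ("mental_health", ["mental_health", "ellingham", "child_protection"]),
   ("legal", ["sar_denial", "discrimination", "compensation"]),
   ("system_failure", ["entrapment", "negligence"]),
   ("evidence", ["critical_evidence"])]

-- the 'for category, tags in …: if tag in tags: return category' loop of A
def pvCatLoop (tag : String) : List (String × List String) → String
  | [] => "other"
  | (category, tags) :: rest => if tags.contains tag then category else pvCatLoop tag rest

def get_tag_category_py (tag : String) : String :=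
  pvCatLoop tag pvCategoryMapping.items

-- ===== PORT B =====
-- the sorted module-level table of B
def pvSortedTags : List (String × String) :=
  [("child_protection", "mental_health"),
   ("compensation", "legal"),
   ("critical_evidence", "evidence"),
   ("discrimination", "legal"),
   ("ellingham", "mental_health"),
   ("entrapment", "system_failure"),
   ("homelessness", "housing"),
   ("housing_denial", "housing"),
   ("mental_health", "mental_health"),
   ("negligence", "system_failure"),
   ("sar_denial", "legal"),
   ("section_202", "housing")]

-- the 'while lo < hi' binary-search loop of B (lo, hi stay in 0..12, so Nat is exact;
-- Lean String < is codepoint-lexicographic, exact for Python < on the table's ASCII keys)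
def pvBSearch (tag : String) (lo hi : Nat) : String :=
  if _h : lo < hi then
    if (pvSortedTags.getD ((lo + hi) / 2) ("", "")).1 == tag then
      (pvSortedTags.getD ((lo + hi) / 2) ("", "")).2
    else if (pvSortedTags.getD ((lo + hi) / 2) ("", "")).1 < tag then
      pvBSearch tag ((lo + hi) / 2 + 1) hi
    else
      pvBSearch tag lo ((lo + hi) / 2)
  else "other"
termination_by hi - lo
decreasing_by all_goals omega

def get_tag_category_py_alt (tag : String) : String :=
  pvBSearch tag 0 pvSortedTags.length

-- ===== PRECONDITION & SPEC =====
def Spec_get_tag_category_py (tag : String) (out : String) : Prop := out = get_tag_category_py_alt tag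
instance (tag : String) (out : String) : Decidable (Spec_get_tag_category_py tag out) := by unfold Spec_get_tag_category_py; infer_instance

-- ===== CLAIM (what is proved, stated in full; the proofs are below) =====
def Claim_equal_get_tag_category_py : Prop := ∀ (tag : String), Dom_get_tag_category_py tag → Spec_get_tag_category_py tag (get_tag_category_py tag)

-- ===== LEMMAS AND PROOFS =====

def pvKey (i : Nat) : String := (pvSortedTags.getD i ("", "")).1

-- the table is strictly sorted on its keys
theorem pvKey_sorted : ∀ i < 12, ∀ j < 12, i < j → pvKey i < pvKey j := by
  simp only [String.lt_iff_toList_lt]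
  decide

-- on each table key, A's loop returns that key's category
theorem pvFound : ∀ i < 12, pvCatLoop (pvKey i) pvCategoryMapping.items = (pvSortedTags.getD i ("", "")).2 := by
  decide

-- if tag is none of the 12 table keys, A's loop returns "other"
theorem pvNotFound (tag : String) (h : ∀ i < 12, pvKey i ≠ tag) :
    pvCatLoop tag pvCategoryMapping.items = "other" := by
  have hb : ∀ i < 12, (pvKey i == tag) = false := fun i hi =>
    beq_eq_false_iff_ne.mpr (h i hi)
  have hk : ∀ i < 12, ((pvSortedTags.getD i ("", "")).1 == tag) = false := hb
  have c1 : ("housing_denial" == tag) = false := hk 7 (by norm_num)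
  have c2 : ("section_202" == tag) = false := hk 11 (by norm_num)
  have c3 : ("homelessness" == tag) = false := hk 6 (by norm_num)
  have c4 : ("mental_health" == tag) = false := hk 8 (by norm_num)
  have c5 : ("ellingham" == tag) = false := hk 4 (by norm_num)
  have c6 : ("child_protection" == tag) = false := hk 0 (by norm_num)
  have c7 : ("sar_denial" == tag) = false := hk 10 (by norm_num)
  have c8 : ("discrimination" == tag) = false := hk 3 (by norm_num)
  have c9 : ("compensation" == tag) = false := hk 1 (by norm_num)
  have c10 : ("entrapment" == tag) = false := hk 5 (by norm_num)
  have c11 : ("negligence" == tag) = false := hk 9 (by norm_num)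
  have c12 : ("critical_evidence" == tag) = false := hk 2 (by norm_num)
  simp only [pvCategoryMapping, pvCatLoop,
    List.contains_eq_mem, List.mem_cons, List.not_mem_nil, or_false,
    decide_eq_true_eq]
  have ne : ∀ s : String, (s == tag) = false → ¬ tag = s := by
    intro s hs he; rw [he, BEq.refl] at hs; exact Bool.true_eq_false.mp hs
  have d1 := ne _ c1; have d2 := ne _ c2; have d3 := ne _ c3
  have d4 := ne _ c4; have d5 := ne _ c5; have d6 := ne _ c6
  have d7 := ne _ c7; have d8 := ne _ c8; have d9 := ne _ c9
  have d10 := ne _ c10; have d11 := ne _ c11; have d12 := ne _ c12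
  rw [if_neg, if_neg, if_neg, if_neg, if_neg] <;> tauto

-- binary search over the table agrees with A's loop whenever every key outside the
-- current window is already known to differ from tag
theorem pvBSearch_eq (tag : String) :
    ∀ (n lo hi : Nat), hi ≤ 12 → hi - lo ≤ n →
      (∀ i < 12, (i < lo ∨ hi ≤ i) → pvKey i ≠ tag) →
      pvBSearch tag lo hi = pvCatLoop tag pvCategoryMapping.items := by
  intro n
  induction n with
  | zero =>
    intro lo hi h12 hn hout
    rw [pvBSearch, dif_neg (by omega)]
    exact (pvNotFound tag (fun i hi' => hout i hi' (by omega))).symm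
  | succ n ih =>
    intro lo hi h12 hn hout
    by_cases hlt : lo < hi
    · have hmid1 : lo ≤ (lo + hi) / 2 := by omega
      have hmid2 : (lo + hi) / 2 < hi := by omega
      have hmid12 : (lo + hi) / 2 < 12 := by omega
      rw [pvBSearch, dif_pos hlt]
      by_cases heq : (pvSortedTags.getD ((lo + hi) / 2) ("", "")).1 == tag
      · rw [if_pos heq]
        have : tag = pvKey ((lo + hi) / 2) := (eq_of_beq heq).symm
        rw [this]
        exact (pvFound _ hmid12).symm
      · rw [if_neg heq]
        have hne : pvKey ((lo + hi) / 2) ≠ tag := fun h => heq (beq_iff_eq.mpr h)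
        by_cases hlt2 : (pvSortedTags.getD ((lo + hi) / 2) ("", "")).1 < tag
        · rw [if_pos hlt2]
          refine ih ((lo + hi) / 2 + 1) hi h12 (by omega) ?_
          intro i hi' hcase
          rcases hcase with hcase | hcase
          · by_cases hio : i < lo
            · exact hout i hi' (Or.inl hio)
            · -- lo ≤ i ≤ mid : key i ≤ key mid < tag
              have hle : pvKey i < tag := by
                rcases Nat.lt_or_ge i ((lo + hi) / 2) with hi2 | hi2
                · exact lt_trans (pvKey_sorted i hi' ((lo + hi) / 2) hmid12 hi2) hlt2
                · have : i = (lo + hi) / 2 := by omega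
                  rw [this]; exact hlt2
              exact ne_of_lt hle
          · exact hout i hi' (Or.inr hcase)
        · rw [if_neg hlt2]
          have htg : tag < pvKey ((lo + hi) / 2) :=
            lt_of_le_of_ne (le_of_not_gt hlt2) (Ne.symm hne)
          refine ih lo ((lo + hi) / 2) (by omega) (by omega) ?_
          intro i hi' hcase
          rcases hcase with hcase | hcase
          · exact hout i hi' (Or.inl hcase)
          · by_cases hio : hi ≤ i
            · exact hout i hi' (Or.inr hio)
            · -- mid ≤ i < hi : tag < key mid ≤ key i
              have hle : tag < pvKey i := by
                rcases Nat.lt_or_ge ((lo + hi) / 2) i with hi2 | hi2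
                · exact lt_trans htg (pvKey_sorted ((lo + hi) / 2) hmid12 i hi' hi2)
                · have : i = (lo + hi) / 2 := by omega
                  rw [this]; exact htg
              exact (ne_of_lt hle).symm
    · rw [pvBSearch, dif_neg hlt]
      exact (pvNotFound tag (fun i hi' => hout i hi' (by omega))).symm

-- ===== VERDICT (by name: the statement is the Claim_ definition above) =====
theorem get_tag_category_py_spec : Claim_equal_get_tag_category_py := by
  intro tag _
  unfold Spec_get_tag_category_py get_tag_category_py get_tag_category_py_alt
  have h12 : pvSortedTags.length = 12 := rfl
  rw [h12]
  exact (pvBSearch_eq tag 12 0 12 (by omega) (by omega) (fun i hi' hc => by omega)).symm
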